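-- pv_equiv track=rewrite | github.com/nuclia/nucliadb | nucliadb/src/nucliadb/ingest/orm/processor/pgcatalog.py | extract_facets
-- ===== SOURCE A (Python) =====
-- def extract_facets(labels):
--     facets = set()
--     for label in labels:
--         parts = label.split("/")
--         facet = ""
--         for part in parts[1:]:
--             facet += f"/{part}"
--             facets.add(facet)
--     return facets
-- ===== SOURCE B (Python) =====
-- def extract_facets(labels):
--     facets = set()
--     for label in labels:
--         parts = label.split("/")
--         for i in range(2, len(parts) + 1):
--             facets.add("/" + "/".join(parts[1:i]))
--     return facets
-- ===== Notes on version B (the rewrite author's own statement) =====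
-- stated objective: alternative
-- what changed: Each facet is rebuilt independently from a slice of the split parts ('/' + '/'.join(parts[1:i]) for each i) instead of growing a running prefix accumulator through the inner loop.
import Mathlib
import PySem

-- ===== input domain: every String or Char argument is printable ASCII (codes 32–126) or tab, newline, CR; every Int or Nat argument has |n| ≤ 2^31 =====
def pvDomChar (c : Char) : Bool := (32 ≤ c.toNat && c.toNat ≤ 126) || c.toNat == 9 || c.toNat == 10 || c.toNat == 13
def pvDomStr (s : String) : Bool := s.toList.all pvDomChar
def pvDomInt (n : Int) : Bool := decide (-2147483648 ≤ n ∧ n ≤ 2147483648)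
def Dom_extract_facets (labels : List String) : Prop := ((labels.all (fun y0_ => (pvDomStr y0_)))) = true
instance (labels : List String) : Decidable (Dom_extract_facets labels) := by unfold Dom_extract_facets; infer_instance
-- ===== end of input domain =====

-- B rebuilds each facet independently from a slice of the split parts instead of growing a
-- running prefix accumulator (objective: alternative decomposition, same behaviour).

-- ===== PORT A =====
def extract_facets (labels : List String) : List String :=
  labels.foldl
    (fun facets label =>
      let parts := (PySem.Str.split? label "/").getD []   -- sep "/" is nonempty, split? is always some
      ((PySem.List.slice parts (some 1) none).foldl
        (fun (st : String × PySem.Set String) part =>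
          let facet := st.1 ++ ("/" ++ part)
          (facet, PySem.Set.add st.2 facet))
        ("", facets)).2)
    PySem.Set.empty

-- ===== PORT B =====
def extract_facets_alt (labels : List String) : List String :=
  labels.foldl
    (fun facets label =>
      let parts := (PySem.Str.split? label "/").getD []   -- sep "/" is nonempty, split? is always some
      (PySem.List.pyRange 2 (PySem.List.len parts + 1) 1).foldl
        (fun facets i =>
          PySem.Set.add facets ("/" ++ PySem.Str.join "/" (PySem.List.slice parts (some 1) (some i))))
        facets)
    PySem.Set.empty

-- ===== PRECONDITION & SPEC =====
def Spec_extract_facets (labels : List String) (out : List String) : Prop := out = extract_facets_alt labels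
instance (labels : List String) (out : List String) : Decidable (Spec_extract_facets labels out) := by unfold Spec_extract_facets; infer_instance

-- ===== CLAIM (what is proved, stated in full; the proofs are below) =====
def Claim_equal_extract_facets : Prop := ∀ (labels : List String), Dom_extract_facets labels → Spec_extract_facets labels (extract_facets labels)

-- ===== LEMMAS AND PROOFS =====

-- common form of the per-label inner loop: add all "/"-prefixed prefixes of t, extending facet
def prefixAdds : List String → String → PySem.Set String → PySem.Set String
  | [], _, s => s
  | p :: t, facet, s => prefixAdds t (facet ++ ("/" ++ p)) (PySem.Set.add s (facet ++ ("/" ++ p)))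

lemma join_singleton_str (p : String) : PySem.Str.join "/" [p] = p := by
  simp [PySem.Str.join, PySem.Chars.join_singleton]

lemma join_cons_cons_str (p q : String) (t : List String) :
    PySem.Str.join "/" (p :: q :: t) = p ++ ("/" ++ PySem.Str.join "/" (q :: t)) := by
  apply String.toList_inj.mp
  simp [PySem.Str.join, PySem.Chars.join_cons_cons, String.toList_append]

lemma str_assoc (a b c : String) : a ++ b ++ c = a ++ (b ++ c) := String.append_assoc

lemma A_inner (t : List String) : ∀ (facet : String) (s : PySem.Set String),
    (t.foldl
      (fun (st : String × PySem.Set String) part =>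
        (st.1 ++ ("/" ++ part), PySem.Set.add st.2 (st.1 ++ ("/" ++ part))))
      (facet, s)).2 = prefixAdds t facet s := by
  induction t with
  | nil => intro facet s; rfl
  | cons p t ih => intro facet s; simp only [List.foldl_cons, prefixAdds]; exact ih _ _

lemma B_inner (t : List String) : ∀ (facet : String) (s : PySem.Set String),
    (List.range t.length).foldl
      (fun s k => PySem.Set.add s (facet ++ ("/" ++ PySem.Str.join "/" (t.take (k + 1))))) s
    = prefixAdds t facet s := by
  induction t with
  | nil => intro facet s; rfl
  | cons p t ih =>
    intro facet s
    rw [List.length_cons, List.range_succ_eq_map, List.foldl_cons, List.foldl_map]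
    simp only [List.take_succ_cons, List.take_zero, join_singleton_str, prefixAdds]
    rw [PySem.List.foldl_congr_mem
      (g := fun s k => PySem.Set.add s
        ((facet ++ ("/" ++ p)) ++ ("/" ++ PySem.Str.join "/" (t.take (k + 1)))))]
    · exact ih _ _
    · intro s k hk
      rw [List.mem_range] at hk
      obtain ⟨q, r, rfl⟩ : ∃ q r, t = q :: r := by
        cases t with
        | nil => exact absurd hk (by simp)
        | cons q r => exact ⟨q, r, rfl⟩
      simp only [List.take_succ_cons, join_cons_cons_str, str_assoc]

lemma step_eq :
    (fun (facets : PySem.Set String) (label : String) =>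
      let parts := (PySem.Str.split? label "/").getD []
      ((PySem.List.slice parts (some 1) none).foldl
        (fun (st : String × PySem.Set String) part =>
          let facet := st.1 ++ ("/" ++ part)
          (facet, PySem.Set.add st.2 facet))
        ("", facets)).2)
    = (fun (facets : PySem.Set String) (label : String) =>
      let parts := (PySem.Str.split? label "/").getD []
      (PySem.List.pyRange 2 (PySem.List.len parts + 1) 1).foldl
        (fun facets i =>
          PySem.Set.add facets ("/" ++ PySem.Str.join "/" (PySem.List.slice parts (some 1) (some i))))
        facets) := by
  funext facets label
  simp only [PySem.List.len_eq]
  generalize (PySem.Str.split? label "/").getD [] = parts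
  rw [PySem.List.slice_from (a := 1) (xs := parts) (by norm_num), A_inner,
      PySem.List.pyRange_one, List.foldl_map]
  have hlen : ((parts.length : Int) + 1 - 2).toNat = (parts.drop 1).length := by
    simp only [List.length_drop]; omega
  rw [hlen]
  rw [PySem.List.foldl_congr_mem
    (g := fun s k => PySem.Set.add s
      ("" ++ ("/" ++ PySem.Str.join "/" ((parts.drop 1).take (k + 1)))))]
  · exact (B_inner (parts.drop 1) "" facets).symm
  · intro s k _
    have hsl : PySem.List.slice parts (some 1) (some (2 + (k : Int)))
        = (parts.drop 1).take (k + 1) := by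
      rw [PySem.List.slice_toNat parts (by norm_num) (by positivity)]
      congr 1
      omega
    rw [hsl]
    simp

-- ===== VERDICT (by name: the statement is the Claim_ definition above) =====
theorem extract_facets_spec : Claim_equal_extract_facets := by
  intro labels _
  unfold Spec_extract_facets extract_facets extract_facets_alt
  rw [step_eq]
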